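-- pv_equiv track=rewrite | github.com/Borda/pyDeprecate | src/deprecate/_docs.py | _get_google_arg_indents
-- ===== SOURCE A (Python) =====
-- def _get_google_arg_indents(lines: list[str], section_start: int, section_indent: int) -> tuple[int, int]:
--     """Return ``(arg_indent, continuation_indent)`` for a Google-style Args section.
--
--     *arg_indent* is the column at which individual argument entries begin.
--     *continuation_indent* is the column used for continuation lines within an
--     argument entry (defaults to ``arg_indent + 4`` when not detectable).
--     Returns ``(-1, -1)`` when the section has no non-empty child lines.
--
--     Args:
--         lines: Docstring already split into individual lines.
--         section_start: Line index of the ``Args:`` / ``Arguments:`` header.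
--         section_indent: Leading indentation of that header line.
--
--     Returns:
--         A 2-tuple ``(arg_indent, continuation_indent)``.
--
--     """
--     arg_indent = -1
--     for i in range(section_start + 1, len(lines)):
--         if lines[i].strip():
--             current_indent = len(lines[i]) - len(lines[i].lstrip())
--             if current_indent > section_indent:
--                 arg_indent = current_indent
--             break
--
--     if arg_indent == -1:
--         return -1, -1
--
--     continuation_indent = arg_indent + 4
--     for i in range(section_start + 1, len(lines)):
--         line = lines[i]
--         if not line.strip():
--             continue
--         current_indent = len(line) - len(line.lstrip())
--         if current_indent <= section_indent:
--             break
--         if current_indent > arg_indent: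
--             continuation_indent = current_indent
--             break
--
--     return arg_indent, continuation_indent
-- ===== SOURCE B (Python) =====
-- def _get_google_arg_indents(lines: list[str], section_start: int, section_indent: int) -> tuple[int, int]:
--     """Single state-machine pass over the section body instead of two scans."""
--     arg_indent = -1
--     continuation_indent = -1
--     for i in range(section_start + 1, len(lines)):
--         line = lines[i]
--         if not line.strip():
--             continue
--         current = len(line) - len(line.lstrip())
--         if arg_indent == -1:
--             # first non-empty line decides whether the section has a body
--             if current <= section_indent:
--                 break
--             arg_indent = current
--             continuation_indent = current + 4
--         elif current <= section_indent:
--             break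
--         elif current > arg_indent:
--             continuation_indent = current
--             break
--     return arg_indent, continuation_indent
-- ===== Notes on version B (the rewrite author's own statement) =====
-- stated objective: simpler
-- what changed: Replaces A's two sequential scans over the same line range (one to find arg_indent, a second to find continuation_indent) with a single state-machine pass that decides both columns in one loop.
import Mathlib
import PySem

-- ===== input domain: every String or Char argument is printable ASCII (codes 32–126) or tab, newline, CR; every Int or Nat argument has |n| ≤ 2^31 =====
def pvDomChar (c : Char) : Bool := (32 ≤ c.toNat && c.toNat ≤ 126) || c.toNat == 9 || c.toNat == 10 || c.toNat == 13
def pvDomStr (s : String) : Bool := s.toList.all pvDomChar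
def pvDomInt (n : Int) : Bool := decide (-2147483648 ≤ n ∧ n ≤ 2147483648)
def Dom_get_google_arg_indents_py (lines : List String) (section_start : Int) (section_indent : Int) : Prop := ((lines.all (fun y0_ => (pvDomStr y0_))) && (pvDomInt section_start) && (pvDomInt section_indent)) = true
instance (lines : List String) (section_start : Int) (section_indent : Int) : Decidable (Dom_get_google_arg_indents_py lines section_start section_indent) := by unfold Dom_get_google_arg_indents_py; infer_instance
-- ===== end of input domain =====

-- B replaces A's two sequential scans of the section body by one state-machine pass (objective: simpler).

-- ===== PORT A =====

-- `bool(s.strip())` is false: the line has only whitespace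
def pvBlank (s : String) : Bool := decide (PySem.Chars.strip s.toList = [])

-- `len(line) - len(line.lstrip())`
def pvIndent (s : String) : Int := (s.toList.length : Int) - ((PySem.Chars.lstrip s.toList).length : Int)

-- A's first loop: find the first non-empty line, break unconditionally
def aFirst (lines : List String) (section_indent : Int) : List Int → Int
  | [] => -1
  | i :: is =>
    let line := (PySem.List.pyGet? lines i).getD ""
    if pvBlank line then aFirst lines section_indent is
    else if section_indent < pvIndent line then pvIndent line else -1

-- A's second loop: find the continuation indent
def aSecond (lines : List String) (section_indent arg_indent cont : Int) : List Int → Int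
  | [] => cont
  | i :: is =>
    let line := (PySem.List.pyGet? lines i).getD ""
    if pvBlank line then aSecond lines section_indent arg_indent cont is
    else if pvIndent line ≤ section_indent then cont
    else if arg_indent < pvIndent line then pvIndent line
    else aSecond lines section_indent arg_indent cont is

def get_google_arg_indents_py (lines : List String) (section_start : Int) (section_indent : Int) : Int × Int :=
  let idxs := PySem.List.pyRange (section_start + 1) lines.length 1
  let arg_indent := aFirst lines section_indent idxs
  if arg_indent = -1 then (-1, -1)
  else (arg_indent, aSecond lines section_indent arg_indent (arg_indent + 4) idxs)

-- ===== PORT B =====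

-- B's single loop; state (arg_indent, continuation_indent), arg_indent = -1 marks "body not seen yet"
def bLoop (lines : List String) (section_indent : Int) : List Int → Int × Int → Int × Int
  | [], acc => acc
  | i :: is, (a, c) =>
    let line := (PySem.List.pyGet? lines i).getD ""
    if pvBlank line then bLoop lines section_indent is (a, c)
    else
      let current := pvIndent line
      if a = -1 then
        if current ≤ section_indent then (a, c)
        else bLoop lines section_indent is (current, current + 4)
      else if current ≤ section_indent then (a, c)
      else if a < current then (a, current)
      else bLoop lines section_indent is (a, c)

def get_google_arg_indents_py_alt (lines : List String) (section_start : Int) (section_indent : Int) : Int × Int :=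
  bLoop lines section_indent (PySem.List.pyRange (section_start + 1) lines.length 1) (-1, -1)

-- ===== PRECONDITION & SPEC =====

-- Pre_ excludes exactly the inputs where Python A raises IndexError: section_start + 1 below -len(lines)
def Pre_get_google_arg_indents_py (lines : List String) (section_start : Int) (section_indent : Int) : Prop :=
  -(lines.length : Int) ≤ section_start + 1

instance (lines : List String) (section_start : Int) (section_indent : Int) : Decidable (Pre_get_google_arg_indents_py lines section_start section_indent) := by unfold Pre_get_google_arg_indents_py; infer_instance

def pvWitness_get_google_arg_indents_py : List String × Int × Int :=
  (["Args:", "    x: an int", "        more"], 0, 0)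

def Spec_get_google_arg_indents_py (lines : List String) (section_start : Int) (section_indent : Int) (out : Int × Int) : Prop := out = get_google_arg_indents_py_alt lines section_start section_indent

instance (lines : List String) (section_start : Int) (section_indent : Int) (out : Int × Int) : Decidable (Spec_get_google_arg_indents_py lines section_start section_indent out) := by unfold Spec_get_google_arg_indents_py; infer_instance

-- ===== CLAIM =====

def Claim_equal_get_google_arg_indents_py : Prop := ∀ (lines : List String) (section_start : Int) (section_indent : Int), Dom_get_google_arg_indents_py lines section_start section_indent → Pre_get_google_arg_indents_py lines section_start section_indent → Spec_get_google_arg_indents_py lines section_start section_indent (get_google_arg_indents_py lines section_start section_indent)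

-- ===== LEMMAS AND PROOFS =====

theorem pvIndent_nonneg (s : String) : 0 ≤ pvIndent s := by
  unfold pvIndent
  have h : (PySem.Chars.lstrip s.toList).length ≤ s.toList.length := by
    simp only [PySem.Chars.lstrip]
    exact List.length_dropWhile_le _ _
  omega

-- phase 2: once arg_indent ≠ -1 is fixed, B's loop computes A's second scan
theorem bLoop_phase2 (lines : List String) (si a c : Int) (ha : a ≠ -1) (idxs : List Int) :
    bLoop lines si idxs (a, c) = (a, aSecond lines si a c idxs) := by
  induction idxs with
  | nil => simp [bLoop, aSecond]
  | cons i is ih =>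
    simp only [bLoop, aSecond]
    split_ifs <;> simp_all

-- main invariant over an arbitrary index list
theorem bLoop_main (lines : List String) (si : Int) (idxs : List Int) :
    bLoop lines si idxs (-1, -1) =
      (if aFirst lines si idxs = -1 then ((-1 : Int), (-1 : Int))
       else (aFirst lines si idxs,
             aSecond lines si (aFirst lines si idxs) (aFirst lines si idxs + 4) idxs)) := by
  induction idxs with
  | nil => simp [bLoop, aFirst]
  | cons i is ih =>
    simp only [bLoop, aFirst, aSecond]
    set line := (PySem.List.pyGet? lines i).getD "" with hline
    by_cases hb : pvBlank line = true
    · simp [hb, ih]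
    · have hnn := pvIndent_nonneg line
      by_cases hle : si < pvIndent line
      · have hne : pvIndent line ≠ -1 := by omega
        have hb' : pvBlank line = false := by simpa using hb
        simp [hb', hle, hne, not_le.mpr hle,
          bLoop_phase2 lines si (pvIndent line) (pvIndent line + 4) hne is]
      · simp [hb, not_lt.mp hle]

-- ===== VERDICT =====

theorem get_google_arg_indents_py_spec : Claim_equal_get_google_arg_indents_py := by
  intro lines section_start section_indent _ _
  unfold Spec_get_google_arg_indents_py get_google_arg_indents_py get_google_arg_indents_py_alt
  rw [bLoop_main]
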